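-- pv_equiv track=rewrite | github.com/akshymoh95/tforai-duplicate | rai_dynamic_reasoner.py | _pick_row_id_field
-- ===== SOURCE A (Python) =====
-- from typing import Any, Callable, Dict, List, Optional, Tuple
--
-- def _pick_row_id_field(fields: List[str]) -> Optional[str]:
--     if not fields:
--         return None
--     lower_map = {f.lower(): f for f in fields}
--     priority = [
--         "event_id",
--         "row_id",
--         "record_id",
--         "incident_id",
--         "ticket_id",
--         "id",
--         "tedet_id",
--     ]
--     for cand in priority:
--         if cand in lower_map:
--             return lower_map[cand]
--     return None
-- ===== SOURCE B (Python) =====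
-- from typing import List, Optional
--
-- def _pick_row_id_field(fields: List[str]) -> Optional[str]:
--     # Single pass: keep the best-ranked (lowest priority index) field seen so far;
--     # <= makes a later field with the same rank win (A's dict keeps the last duplicate).
--     prio = {"event_id": 0, "row_id": 1, "record_id": 2, "incident_id": 3,
--             "ticket_id": 4, "id": 5, "tedet_id": 6}
--     best: Optional[str] = None
--     best_rank = len(prio)
--     for f in fields:
--         r = prio.get(f.lower())
--         if r is not None and r <= best_rank:
--             best, best_rank = f, r
--     return best
-- ===== Notes on version B (the rewrite author's own statement) =====
-- stated objective: alternative
-- what changed: Replaces A's two-stage 'build last-wins lowercase map, then probe the priority list in order' with a single pass over fields keeping a running argmin of the priority rank (rank <= best replaces, giving the same last-wins tie-breaking), with no empty-input guard needed.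
import Mathlib
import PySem

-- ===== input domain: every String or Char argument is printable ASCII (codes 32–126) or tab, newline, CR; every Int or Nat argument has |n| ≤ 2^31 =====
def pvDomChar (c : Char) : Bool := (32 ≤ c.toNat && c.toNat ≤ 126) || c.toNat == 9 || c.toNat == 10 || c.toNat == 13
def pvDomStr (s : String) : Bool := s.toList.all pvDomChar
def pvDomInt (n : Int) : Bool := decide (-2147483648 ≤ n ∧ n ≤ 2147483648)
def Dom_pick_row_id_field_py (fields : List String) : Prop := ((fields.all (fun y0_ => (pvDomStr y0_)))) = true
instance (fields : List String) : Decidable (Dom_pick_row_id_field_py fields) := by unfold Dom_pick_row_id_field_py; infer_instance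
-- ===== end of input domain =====

-- B replaces A's two-stage 'build a last-wins lowercase map, then probe the priority list'
-- by one pass over fields keeping a running argmin of the priority rank; objective: alternative.

-- ===== PORT A =====
def pvPriority : List String :=
  ["event_id", "row_id", "record_id", "incident_id", "ticket_id", "id", "tedet_id"]

-- the 'for cand in priority: if cand in lower_map: return lower_map[cand]' loop
def pvLoopA (d : PySem.Dict String String) : List String → Option String
  | [] => none
  | c :: rest => if d.contains c then d.get? c else pvLoopA d rest

def pick_row_id_field_py (fields : List String) : Option String :=
  if fields = [] then none
  else
    let lower_map : PySem.Dict String String :=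
      fields.foldl (fun d f => d.insert (PySem.Str.lower f) f) PySem.Dict.empty
    pvLoopA lower_map pvPriority

-- ===== PORT B =====
-- the dict literal 'prio'
def pvPrio : PySem.Dict String Int :=
  PySem.Dict.ofList [("event_id", 0), ("row_id", 1), ("record_id", 2), ("incident_id", 3),
                     ("ticket_id", 4), ("id", 5), ("tedet_id", 6)]

-- the 'for f in fields: r = prio.get(f.lower()); if r is not None and r <= best_rank: …' loop
def pick_row_id_field_py_alt (fields : List String) : Option String :=
  (fields.foldl
    (fun st f =>
      match pvPrio.get? (PySem.Str.lower f) with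
      | some r => if r ≤ st.2 then (some f, r) else st
      | none => st)
    ((none : Option String), (7 : Int))).1

-- ===== PRECONDITION & SPEC =====
def Spec_pick_row_id_field_py (fields : List String) (out : Option String) : Prop := out = pick_row_id_field_py_alt fields
instance (fields : List String) (out : Option String) : Decidable (Spec_pick_row_id_field_py fields out) := by unfold Spec_pick_row_id_field_py; infer_instance

-- ===== CLAIM (what is proved, stated in full; the proofs are below) =====
def Claim_equal_pick_row_id_field_py : Prop := ∀ (fields : List String), Dom_pick_row_id_field_py fields → Spec_pick_row_id_field_py fields (pick_row_id_field_py fields)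

-- ===== LEMMAS AND PROOFS =====

-- proof-only spec: first priority candidate matched in rev (rev = reversed fields, so last-wins)
def pvFind (rev : List String) : List String → Option String
  | [] => none
  | c :: rest =>
      match rev.find? (fun f => PySem.Str.lower f == c) with
      | some f => some f
      | none => pvFind rev rest

-- rank (index in pr) of pvFind's result; pr.length when there is none
def pvRk (pr rev : List String) : Nat :=
  match pvFind rev pr with
  | some f => ((pr.findIdx? (· == PySem.Str.lower f)).getD pr.length)
  | none => pr.length

-- (candidate, index) pairs starting at offset k — the shape of the prio dict's items
def pvPairs : List String → Int → List (String × Int)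
  | [], _ => []
  | s :: rest, k => (s, k) :: pvPairs rest (k + 1)

-- A's last-wins lowercase dict answers a lookup exactly as the first match in the reversed list.
lemma pv_get_fold (fields : List String) (c : String) :
    (fields.foldl (fun d f => d.insert (PySem.Str.lower f) f)
        (PySem.Dict.empty : PySem.Dict String String)).get? c
      = fields.reverse.find? (fun f => PySem.Str.lower f == c) := by
  induction fields using List.reverseRecOn with
  | nil => simp [PySem.Dict.get?_empty]
  | append_singleton xs x ih =>
      rw [List.foldl_append]
      simp only [List.foldl, List.reverse_append, List.reverse_singleton,
        List.singleton_append, List.find?]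
      rw [PySem.Dict.get?_insert]
      by_cases h : PySem.Str.lower x = c
      · simp [h]
      · have hb : (PySem.Str.lower x == c) = false := by simp [h]
        rw [if_neg (fun hc => h hc.symm), hb, ih]

-- A's priority loop over that dict is pvFind on the reversed field list.
lemma pv_loopA_eq (fields : List String) (pr : List String) :
    pvLoopA (fields.foldl (fun d f => d.insert (PySem.Str.lower f) f) PySem.Dict.empty) pr
      = pvFind fields.reverse pr := by
  induction pr with
  | nil => rfl
  | cons c rest ih =>
      simp only [pvLoopA, pvFind]
      rw [PySem.Dict.contains_eq_isSome_get?, pv_get_fold]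
      cases h : fields.reverse.find? (fun f => PySem.Str.lower f == c) with
      | none => simp [ih]
      | some f => simp

-- get? on a literal dict is first-match over its items list
lemma pv_dict_get (ps : List (String × Int)) (c : String) :
    (PySem.Dict.mk ps).get? c = (ps.find? (·.1 == c)).map (·.2) := by
  induction ps with
  | nil => rfl
  | cons p rest ih =>
      rw [List.find?_cons]
      cases p with
      | mk k v =>
        rw [PySem.Dict.get?_mk_cons]
        by_cases h : (k == c)
        · simp [h]
        · simp only [h]; simp [ih]

-- first-match over index pairs is findIdx? shifted by the offset
lemma pv_pairs_find (pr : List String) (c : String) (k : Int) :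
    ((pvPairs pr k).find? (·.1 == c)).map (·.2)
      = (pr.findIdx? (· == c)).map (fun i => (i : Int) + k) := by
  induction pr generalizing k with
  | nil => rfl
  | cons s rest ih =>
      rw [pvPairs, List.find?_cons, List.findIdx?_cons]
      by_cases h : (s == c)
      · simp [h]
      · simp only [h, Bool.false_eq_true, if_false]
        rw [ih (k + 1)]
        cases rest.findIdx? (· == c) <;> simp
        push_cast
        ring

-- the prio dict literal is lookup of the index in pvPriority
lemma pvPrio_get (c : String) :
    pvPrio.get? c = (pvPriority.findIdx? (· == c)).map (fun i => (i : Int)) := by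
  have hm : pvPrio = PySem.Dict.mk (pvPairs pvPriority 0) := by decide
  rw [hm, pv_dict_get, pv_pairs_find]
  cases pvPriority.findIdx? (· == c) <;> simp

lemma pvFind_mem {rev pr : List String} {f : String} (h : pvFind rev pr = some f) : f ∈ rev := by
  induction pr with
  | nil => simp [pvFind] at h
  | cons c rest ih =>
      simp only [pvFind] at h
      cases hf : rev.find? (fun g => PySem.Str.lower g == c) with
      | some g => rw [hf] at h; cases h; exact List.mem_of_find?_eq_some hf
      | none => rw [hf] at h; exact ih h

lemma pvRk_some {pr rev : List String} {f : String} (h : pvFind rev pr = some f) :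
    pvRk pr rev = (pr.findIdx? (· == PySem.Str.lower f)).getD pr.length := by
  unfold pvRk; rw [h]

lemma pvRk_none {pr rev : List String} (h : pvFind rev pr = none) :
    pvRk pr rev = pr.length := by
  unfold pvRk; rw [h]

-- when candidate c matches nothing in rev, prepending c bumps the rank by one
lemma pvRk_cons_of_none {rev : List String} {c : String} (rest : List String)
    (hn : rev.find? (fun f => PySem.Str.lower f == c) = none) :
    pvRk (c :: rest) rev = pvRk rest rev + 1 := by
  have hstep : pvFind rev (c :: rest) = pvFind rev rest := by
    simp only [pvFind, hn]
  cases hf : pvFind rev rest with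
  | none => rw [pvRk_none (hstep.trans hf), pvRk_none hf]; rfl
  | some f =>
      have hne : PySem.Str.lower f ≠ c := by
        have := List.find?_eq_none.mp hn f (pvFind_mem hf)
        simpa using this
      have hb : (c == PySem.Str.lower f) = false := by simp [Ne.symm hne]
      rw [pvRk_some (hstep.trans hf), pvRk_some hf, List.findIdx?_cons, hb]
      cases hfi : rest.findIdx? (· == PySem.Str.lower f) <;> simp [hfi]

-- key step: what prepending one field x to rev does to pvFind, in terms of x's rank
lemma pvFind_cons (pr rev : List String) (x : String) :
    pvFind (x :: rev) pr =
      match pr.findIdx? (· == PySem.Str.lower x) with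
      | some i => if i ≤ pvRk pr rev then some x else pvFind rev pr
      | none => pvFind rev pr := by
  induction pr with
  | nil => rfl
  | cons c rest ih =>
      by_cases hx : PySem.Str.lower x = c
      · have hb : (c == PySem.Str.lower x) = true := by simp [hx]
        simp only [pvFind, List.find?_cons, List.findIdx?_cons, hb]
        simp [hx]
      · have hb : (c == PySem.Str.lower x) = false := by simp [Ne.symm hx]
        have hbx : (PySem.Str.lower x == c) = false := by simp [hx]
        have hIdx : (c :: rest).findIdx? (· == PySem.Str.lower x)
            = (rest.findIdx? (· == PySem.Str.lower x)).map (· + 1) := by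
          rw [List.findIdx?_cons, hb]; rfl
        rw [hIdx]
        cases hf : rev.find? (fun f => PySem.Str.lower f == c) with
        | some f =>
            have hlf : PySem.Str.lower f = c := by
              have := List.find?_eq_some_iff_append.mp hf
              simpa using this.1
            have hfind : pvFind rev (c :: rest) = some f := by
              simp only [pvFind, hf]
            have hrk : pvRk (c :: rest) rev = 0 := by
              rw [pvRk_some hfind, List.findIdx?_cons]
              simp [hlf]
            have hlhs : pvFind (x :: rev) (c :: rest) = some f := by
              simp only [pvFind, List.find?_cons, hbx, hf]
            rw [hlhs, hrk, hfind]
            cases hfi : rest.findIdx? (· == PySem.Str.lower x) <;> simp [hfi]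
        | none =>
            have hlhs : pvFind (x :: rev) (c :: rest) = pvFind (x :: rev) rest := by
              simp only [pvFind, List.find?_cons, hbx, hf]
            have hfind : pvFind rev (c :: rest) = pvFind rev rest := by
              simp only [pvFind, hf]
            rw [hlhs, ih, hfind, pvRk_cons_of_none rest hf]
            cases hfi : rest.findIdx? (· == PySem.Str.lower x) with
            | none => simp [hfi]
            | some i =>
                simp only [hfi, Option.map_some]
                by_cases hle : i ≤ pvRk rest rev
                · rw [if_pos hle, if_pos (by omega)]
                · rw [if_neg hle, if_neg (by omega)]

-- same for the rank itself
lemma pvRk_cons (pr rev : List String) (x : String) :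
    pvRk pr (x :: rev) =
      match pr.findIdx? (· == PySem.Str.lower x) with
      | some i => if i ≤ pvRk pr rev then i else pvRk pr rev
      | none => pvRk pr rev := by
  cases hfi : pr.findIdx? (· == PySem.Str.lower x) with
  | none =>
      simp only
      cases hf : pvFind rev pr with
      | none =>
          have : pvFind (x :: rev) pr = none := by rw [pvFind_cons, hfi, hf]
          rw [pvRk_none this, pvRk_none hf]
      | some f =>
          have : pvFind (x :: rev) pr = some f := by rw [pvFind_cons, hfi, hf]
          rw [pvRk_some this, pvRk_some hf]
  | some i =>
      simp only
      by_cases hle : i ≤ pvRk pr rev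
      · have hx : pvFind (x :: rev) pr = some x := by rw [pvFind_cons, hfi]; simp [hle]
        rw [pvRk_some hx, hfi, if_pos hle]; rfl
      · have heq : pvFind (x :: rev) pr = pvFind rev pr := by rw [pvFind_cons, hfi]; simp [hle]
        rw [if_neg hle]
        cases hf : pvFind rev pr with
        | none => rw [pvRk_none (heq.trans hf), pvRk_none hf]
        | some f => rw [pvRk_some (heq.trans hf), pvRk_some hf]

-- B's fold computes pvFind on the reversed list, together with its rank
lemma pv_fold_eq (xs : List String) :
    xs.foldl
      (fun st f =>
        match pvPrio.get? (PySem.Str.lower f) with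
        | some r => if r ≤ st.2 then (some f, r) else st
        | none => st)
      ((none : Option String), (7 : Int))
    = (pvFind xs.reverse pvPriority, (pvRk pvPriority xs.reverse : Int)) := by
  induction xs using List.reverseRecOn with
  | nil => decide
  | append_singleton ys x ih =>
      rw [List.foldl_append, ih]
      simp only [List.foldl, List.reverse_append, List.reverse_singleton, List.singleton_append]
      rw [pvPrio_get, pvFind_cons, pvRk_cons]
      cases hfi : pvPriority.findIdx? (· == PySem.Str.lower x) with
      | none => rfl
      | some i =>
          by_cases hle : i ≤ pvRk pvPriority ys.reverse
          · have hc : ((i : Int) ≤ (pvRk pvPriority ys.reverse : Int)) := by exact_mod_cast hle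
            simp [hle, hc]
          · have hc : ¬((i : Int) ≤ (pvRk pvPriority ys.reverse : Int)) := by exact_mod_cast hle
            simp [hle, hc]

-- ===== VERDICT (by name: the statement is the Claim_ definition above) =====
theorem pick_row_id_field_py_spec : Claim_equal_pick_row_id_field_py := by
  intro fields _
  unfold Spec_pick_row_id_field_py pick_row_id_field_py pick_row_id_field_py_alt
  rw [pv_fold_eq]
  by_cases h : fields = []
  · subst h; rfl
  · simp only [h, if_false]
    exact pv_loopA_eq fields pvPriority
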